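-- pv_equiv track=rewrite | github.com/manmeetgill0505/Gill_CSC364_Assignment_1 | router2_skeleton.py | find_ip_range
-- ===== SOURCE A (Python) =====
-- def padd_bits(ip):
--     while len(ip) != 32:
--         ip = '0' + ip
--     return ip
--
-- def find_ip_range(network_dst, netmask):
--     # 1. Perform a bitwise AND on the network destination and netmask
--     # to get the minimum IP address in the range.
--     bitwise_and = network_dst & netmask
--     # 2. Perform a bitwise NOT on the netmask
--     # to get the number of total IPs in this range.
--     # Because the built-in bitwise NOT or compliment operator (~) works with signed ints,
--     # we need to create our own bitwise NOT operator for our unsigned int (a netmask).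
--     compliment = bit_not(netmask)
--     min_ip = bitwise_and
--     # 3. Add the total number of IPs to the minimum IP
--     # to get the maximum IP address in the range.
--     max_ip = bitwise_and + compliment
--     min_bin = padd_bits(bin(min_ip)[2:])
--     max_bin = padd_bits(bin(max_ip)[2:])
--
--     max_arr = []
--     min_arr = []
--     j = 0
--     for i in range(4):
--         min_arr.append(str(int(min_bin[j:j+8], 2)))
--         max_arr.append(str(int(max_bin[j:j+8], 2)))
--         j += 8
--
--     min_ip = ".".join(s for s in min_arr)
--     max_ip = ".".join(s for s in max_arr)
--     # 4. Return a list containing the minimum and maximum IP in the range.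
--     return [min_ip, max_ip]
--
-- def bit_not(n, numbits=32):
--     return (1 << numbits) - 1 - n
-- ===== SOURCE B (Python) =====
-- def find_ip_range(network_dst, netmask):
--     min_ip = network_dst & netmask
--     max_ip = min_ip + (0xFFFFFFFF - netmask)
--     def dotted(ip):
--         return ".".join(str((ip >> s) & 0xFF) for s in (24, 16, 8, 0))
--     return [dotted(min_ip), dotted(max_ip)]
-- ===== Notes on version B (the rewrite author's own statement) =====
-- stated objective: idiomatic
-- what changed: B formats each IP by bit-shift octet extraction ((ip>>s)&0xFF for s in 24,16,8,0) instead of A's binary-string path (bin, pad to 32 chars with a while loop, slice 8-char chunks, int(_,2)), dropping padd_bits and the index loop entirely.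
-- outside the precondition, e.g. on find_ip_range(-536870912, -1): A returns ['32.0.0.0', '224.0.0.0'], B returns ['224.0.0.0', '224.0.0.0']
import Mathlib
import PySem

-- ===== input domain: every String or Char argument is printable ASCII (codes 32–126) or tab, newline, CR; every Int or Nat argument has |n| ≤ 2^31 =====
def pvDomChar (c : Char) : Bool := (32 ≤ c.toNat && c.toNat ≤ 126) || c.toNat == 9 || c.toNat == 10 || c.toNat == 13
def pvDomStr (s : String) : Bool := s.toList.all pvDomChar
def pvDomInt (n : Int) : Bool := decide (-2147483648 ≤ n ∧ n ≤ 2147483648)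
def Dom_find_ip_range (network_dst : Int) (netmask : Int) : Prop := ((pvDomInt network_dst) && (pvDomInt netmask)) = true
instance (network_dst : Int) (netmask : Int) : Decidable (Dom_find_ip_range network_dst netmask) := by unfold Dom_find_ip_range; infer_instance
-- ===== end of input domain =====

-- B formats the two IPs by bit-shift octet extraction instead of A's pad-a-binary-string-and-reparse path; return value only, no mutation.

-- ===== PORT A =====
-- helper bit_not(n, numbits=32)
def bit_not (n : Int) (numbits : Nat) : Int := (1 <<< numbits) - 1 - n

-- helper padd_bits: Python's unbounded `while len(ip) != 32: ip = '0' + ip`; fuel 32 covers every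
-- terminating run (strings of length ≤ 32, the only ones reachable under Pre_); on longer strings Python diverges.
def padd_bits : Nat → List Char → List Char
  | 0, ip => ip
  | f+1, ip => if ip.length = 32 then ip else padd_bits f ('0' :: ip)

-- hand port of int(s, 2), exact on strings of binary digits '0'/'1' (the only arguments it receives under Pre_)
def int_base2 (cs : List Char) : Int := cs.foldl (fun acc c => acc * 2 + (if c = '1' then 1 else 0)) 0

def find_ip_range (network_dst : Int) (netmask : Int) : List String :=
  let bitwise_and := PySem.Int.band network_dst netmask
  let compliment := bit_not netmask 32
  let min_ip := bitwise_and
  let max_ip := bitwise_and + compliment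
  let min_bin := padd_bits 32 (PySem.List.slice (PySem.Int.toBinChars0b min_ip) (some 2) none)
  let max_bin := padd_bits 32 (PySem.List.slice (PySem.Int.toBinChars0b max_ip) (some 2) none)
  let res := (PySem.List.pyRange 0 4 1).foldl
    (fun (st : List String × List String × Int) _i =>
      (st.1 ++ [PySem.Int.toStr (int_base2 (PySem.List.slice min_bin (some st.2.2) (some (st.2.2 + 8))))],
       st.2.1 ++ [PySem.Int.toStr (int_base2 (PySem.List.slice max_bin (some st.2.2) (some (st.2.2 + 8))))],
       st.2.2 + 8)) ([], [], 0)
  [PySem.Str.join "." res.1, PySem.Str.join "." res.2.1]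

-- ===== PORT B =====
def find_ip_range_alt (network_dst : Int) (netmask : Int) : List String :=
  let min_ip := PySem.Int.band network_dst netmask
  let max_ip := min_ip + (4294967295 - netmask)
  let dotted := fun (ip : Int) =>
    PySem.Str.join "." (([24, 16, 8, 0] : List Int).map (fun s => PySem.Int.toStr (PySem.Int.band (ip >>> s) 255)))
  [dotted min_ip, dotted max_ip]

-- ===== PRECONDITION & SPEC =====
-- Pre_ excludes netmask < 0, where Python A almost always diverges in padd_bits or raises ValueError in
-- int(_, 2) (bin() of a negative value), and where the occasional value A does return is an accident of
-- slicing the '-0b' prefix off a negative bin() string (a chunk like '0b100010' still parses in base 2).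
def Pre_find_ip_range (network_dst : Int) (netmask : Int) : Prop := 0 ≤ netmask
instance (network_dst : Int) (netmask : Int) : Decidable (Pre_find_ip_range network_dst netmask) := by unfold Pre_find_ip_range; infer_instance
def pvWitness_find_ip_range : Int × Int := (5, 255)

def Spec_find_ip_range (network_dst : Int) (netmask : Int) (out : List String) : Prop := out = find_ip_range_alt network_dst netmask
instance (network_dst : Int) (netmask : Int) (out : List String) : Decidable (Spec_find_ip_range network_dst netmask out) := by unfold Spec_find_ip_range; infer_instance

-- ===== CLAIM (what is proved, stated in full; the proofs are below) =====
def Claim_equal_find_ip_range : Prop := ∀ (network_dst : Int) (netmask : Int), Dom_find_ip_range network_dst netmask → Pre_find_ip_range network_dst netmask → Spec_find_ip_range network_dst netmask (find_ip_range network_dst netmask)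

-- ===== LEMMAS AND PROOFS =====

def bitsBE : Nat → Nat → List Char
  | 0, _ => []
  | k+1, n => bitsBE k (n / 2) ++ [Nat.digitChar (n % 2)]
def binCh (n : Nat) : List Char :=
  if n < 2 then [Nat.digitChar (n % 2)] else binCh (n / 2) ++ [Nat.digitChar (n % 2)]
decreasing_by exact Nat.div_lt_self (by omega) (by omega)


theorem len_bitsBE (k n : Nat) : (bitsBE k n).length = k := by
  induction k generalizing n with
  | zero => simp [bitsBE]
  | succ k ih => simp [bitsBE, ih]

theorem binCh_lo {n : Nat} (h : n < 2) : binCh n = [(n % 2).digitChar] := by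
  rw [binCh]; split
  · rfl
  · omega

theorem binCh_hi {n : Nat} (h : 2 ≤ n) : binCh n = binCh (n / 2) ++ [(n % 2).digitChar] := by
  rw [binCh]; split
  · omega
  · rfl

theorem toDigitsCore_eq (f : Nat) : ∀ n ds, n < f → Nat.toDigitsCore 2 f n ds = binCh n ++ ds := by
  induction f with
  | zero => intro n ds h; omega
  | succ f ih =>
    intro n ds h
    rw [Nat.toDigitsCore]
    by_cases h2 : n / 2 = 0
    · simp only [h2]
      rw [binCh_lo (by omega)]
      simp
    · rw [if_neg h2, ih (n/2) _ (by omega)]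
      conv_rhs => rw [binCh_hi (n := n) (by omega)]
      simp

theorem toDigits_eq (n : Nat) : Nat.toDigits 2 n = binCh n := by
  rw [Nat.toDigits, toDigitsCore_eq (n+1) n [] (by omega)]; simp

theorem binCh_spec (n : Nat) : binCh n = bitsBE (binCh n).length n ∧ n < 2 ^ (binCh n).length := by
  induction n using Nat.strong_induction_on with
  | _ n ih =>
    by_cases h : n < 2
    · rw [binCh_lo h]
      constructor
      · show _ = bitsBE 1 n
        simp [bitsBE]
      · simpa using h
    · rw [binCh_hi (by omega)]
      obtain ⟨ih1, ih2⟩ := ih (n/2) (Nat.div_lt_self (by omega) (by omega))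
      constructor
      · simp only [List.length_append, List.length_singleton]
        show _ = bitsBE ((binCh (n/2)).length + 1) n
        rw [bitsBE, ← ih1]
      · simp only [List.length_append, List.length_singleton, pow_succ]
        omega

theorem binCh_len_le (n : Nat) : ∀ k, n < 2 ^ (k+1) → (binCh n).length ≤ k + 1 := by
  induction n using Nat.strong_induction_on with
  | _ n ih =>
    intro k h
    by_cases h2 : n < 2
    · rw [binCh_lo h2]; simp
    · rw [binCh_hi (by omega)]
      obtain ⟨k', rfl⟩ : ∃ k', k = k' + 1 := by
        rcases k with _ | k'
        · exfalso; simp at h; omega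
        · exact ⟨k', rfl⟩
      have : n / 2 < 2 ^ (k' + 1) := by
        rw [pow_succ] at h
        omega
      have := ih (n/2) (Nat.div_lt_self (by omega) (by omega)) k' this
      simp only [List.length_append, List.length_singleton]
      omega

theorem bitsBE_zero_ext (k : Nat) : ∀ n, n < 2 ^ k → bitsBE (k+1) n = '0' :: bitsBE k n := by
  induction k with
  | zero =>
    intro n h
    have : n = 0 := by omega
    subst this
    rfl
  | succ k ih =>
    intro n h
    show bitsBE (k+1) (n/2) ++ _ = '0' :: (bitsBE k (n/2) ++ _)
    rw [ih (n/2) (by rw [pow_succ] at h; omega)]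
    simp

theorem bitsBE_replicate (j : Nat) : ∀ k n, n < 2 ^ k → bitsBE (k + j) n = List.replicate j '0' ++ bitsBE k n := by
  induction j with
  | zero => simp
  | succ j ih =>
    intro k n h
    have e : k + (j+1) = (k+1) + j := by omega
    rw [e, ih (k+1) n (by rw [pow_succ]; omega), bitsBE_zero_ext k n h]
    rw [List.replicate_succ']
    simp

theorem mod_pow_succ' (b n : Nat) : n % 2 ^ (b+1) = 2 * (n / 2 % 2 ^ b) + n % 2 := by
  have h1 := Nat.div_add_mod (n/2) (2^b)
  have h2 := Nat.div_add_mod n 2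
  have hmod := Nat.mod_lt (n/2) (y := 2^b) (by positivity)
  have key : n = (2 * (n / 2 % 2 ^ b) + n % 2) + 2 ^ (b+1) * (n / 2 / 2 ^ b) := by
    have e : 2 ^ (b+1) * (n / 2 / 2 ^ b) = 2 * (2 ^ b * (n / 2 / 2 ^ b)) := by ring
    omega
  conv_lhs => rw [key]
  rw [Nat.add_mul_mod_self_left, Nat.mod_eq_of_lt (by rw [pow_succ]; omega)]

theorem bitsBE_add (b : Nat) : ∀ a n, bitsBE (a + b) n = bitsBE a (n / 2 ^ b) ++ bitsBE b (n % 2 ^ b) := by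
  induction b with
  | zero => simp [bitsBE]
  | succ b ih =>
    intro a n
    show bitsBE (a + b) (n / 2) ++ _ = _
    rw [ih a (n/2)]
    have e1 : n / 2 / 2 ^ b = n / 2 ^ (b+1) := by
      rw [Nat.div_div_eq_div_mul, pow_succ, mul_comm 2]
    have e2 : bitsBE (b+1) (n % 2 ^ (b+1)) = bitsBE b (n / 2 % 2 ^ b) ++ [Nat.digitChar (n % 2)] := by
      show bitsBE b (n % 2 ^ (b+1) / 2) ++ [Nat.digitChar (n % 2 ^ (b+1) % 2)] = _
      have d1 : (2 * (n / 2 % 2 ^ b) + n % 2) / 2 = n / 2 % 2 ^ b := by omega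
      have d2 : (2 * (n / 2 % 2 ^ b) + n % 2) % 2 = n % 2 := by omega
      rw [mod_pow_succ' b n, d1, d2]
    rw [e1, e2]
    simp

theorem padd_eq (f : Nat) : ∀ s : List Char, 32 ≤ s.length + f → s.length ≤ 32 →
    padd_bits f s = List.replicate (32 - s.length) '0' ++ s := by
  induction f with
  | zero =>
    intro s h1 h2
    have h3 : s.length = 32 := by omega
    rw [padd_bits, h3]
    simp
  | succ f ih =>
    intro s h1 h2
    rw [padd_bits]
    by_cases h : s.length = 32
    · rw [if_pos h, h]; simp
    · rw [if_neg h, ih ('0' :: s) (by simp; omega) (by simp; omega)]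
      have e : 32 - s.length = (32 - ('0'::s).length) + 1 := by simp; omega
      rw [e, List.replicate_succ']
      simp

theorem pad_toDigits (v : Nat) (hv : v < 2 ^ 32) : padd_bits 32 (Nat.toDigits 2 v) = bitsBE 32 v := by
  rw [toDigits_eq]
  obtain ⟨h1, h2⟩ := binCh_spec v
  have hL : (binCh v).length ≤ 32 := binCh_len_le v 31 hv
  rw [padd_eq 32 (binCh v) (by omega) hL]
  set L := (binCh v).length with hLdef
  have key := bitsBE_replicate (32 - L) L v h2
  have e : L + (32 - L) = 32 := by omega
  rw [e] at key
  rw [h1, key]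

theorem parse_bitsBE (k : Nat) : ∀ n (acc : Int),
    List.foldl (fun acc c => acc * 2 + (if c = '1' then 1 else 0)) acc (bitsBE k n)
      = acc * 2 ^ k + ((n % 2 ^ k : Nat) : Int) := by
  induction k with
  | zero => intro n acc; simp [bitsBE]
  | succ k ih =>
    intro n acc
    show List.foldl _ acc (bitsBE k (n/2) ++ [Nat.digitChar (n % 2)]) = _
    rw [List.foldl_append, ih (n/2) acc]
    simp only [List.foldl_cons, List.foldl_nil]
    have e : (if Nat.digitChar (n % 2) = '1' then (1:Int) else 0) = ((n % 2 : Nat) : Int) := by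
      rcases Nat.mod_two_eq_zero_or_one n with h | h <;> rw [h] <;> decide
    rw [e, mod_pow_succ' k n]
    push_cast
    ring

theorem int_base2_bitsBE (k n : Nat) : int_base2 (bitsBE k n) = ((n % 2 ^ k : Nat) : Int) := by
  rw [int_base2, parse_bitsBE k n 0]
  simp

theorem mod_div_pow (a b n : Nat) : n % 2 ^ (b + a) / 2 ^ b = n / 2 ^ b % 2 ^ a := by
  have h1 := Nat.div_add_mod n (2 ^ (b + a))
  have hlt : n % 2 ^ (b+a) < 2 ^ (b+a) := Nat.mod_lt _ (by positivity)
  have hP : (2:Nat) ^ (b+a) = 2 ^ b * 2 ^ a := pow_add 2 b a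
  have hn : n = n % 2 ^ (b + a) + 2 ^ a * (n / 2 ^ (b + a)) * 2 ^ b := by
    have e2 : 2 ^ (b+a) * (n / 2 ^ (b + a)) = 2 ^ a * (n / 2 ^ (b + a)) * 2 ^ b := by rw [hP]; ring
    omega
  have hdiv : n / 2 ^ b = n % 2 ^ (b + a) / 2 ^ b + 2 ^ a * (n / 2 ^ (b + a)) := by
    conv_lhs => rw [hn]
    exact Nat.add_mul_div_right _ _ (by positivity)
  have hdlt : n % 2 ^ (b + a) / 2 ^ b < 2 ^ a := by
    rw [Nat.div_lt_iff_lt_mul (by positivity : 0 < 2 ^ b)]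
    calc n % 2 ^ (b+a) < 2 ^ (b+a) := hlt
      _ = 2 ^ a * 2 ^ b := by rw [hP]; ring
  rw [hdiv, Nat.add_mul_mod_self_left, Nat.mod_eq_of_lt hdlt]

theorem band_mask (a b : Int) (h : 0 ≤ b) : 0 ≤ PySem.Int.band a b ∧ PySem.Int.band a b ≤ b := by
  unfold PySem.Int.band
  rcases le_or_gt 0 a with ha | ha
  · rw [if_pos ha, if_pos h]
    refine ⟨by positivity, ?_⟩
    calc ((a.toNat &&& b.toNat : Nat) : Int) ≤ (b.toNat : Int) := by exact_mod_cast Nat.and_le_right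
      _ = b := Int.toNat_of_nonneg h
  · rw [if_neg (by omega), if_pos h]
    refine ⟨by positivity, ?_⟩
    calc ((b.toNat - (b.toNat &&& (-a-1).toNat) : Nat) : Int) ≤ (b.toNat : Int) := by exact_mod_cast Nat.sub_le _ _
      _ = b := Int.toNat_of_nonneg h

-- an octet: A's slice-and-parse of the padded bit string = B's shift-and-mask
theorem octet_eq (v : Nat) (i : Nat) (hi : i ≤ 3) :
    int_base2 (PySem.List.slice (bitsBE 32 v) (some ((8*i : Nat) : Int)) (some (((8*i : Nat) : Int) + ((8 : Nat) : Int))))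
      = PySem.Int.band ((v : Int) >>> ((8 * (3 - i) : Nat) : Int)) 255 := by
  rw [PySem.List.slice_natCast_add]
  have h32 : (32:Nat) = 8*i + ((24 - 8*i) + 8) := by omega
  rw [show bitsBE 32 v = bitsBE (8*i + ((24 - 8*i) + 8)) v from by rw [← h32]]
  rw [bitsBE_add ((24 - 8*i) + 8) (8*i) v]
  rw [List.drop_left' (len_bitsBE _ _)]
  rw [show (24 - 8*i) + 8 = 8 + (24 - 8*i) from by omega]
  rw [bitsBE_add (24 - 8*i) 8 _]
  rw [List.take_left' (len_bitsBE _ _)]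
  rw [int_base2_bitsBE]
  rw [show 8 + (24 - 8*i) = (24 - 8*i) + 8 from by omega]
  rw [mod_div_pow 8 (24 - 8*i) v]
  have hsr : ∀ k : Nat, ((v:Int) >>> ((k:Nat):Int)) = ((v >>> k : Nat) : Int) := fun k => by simp
  rw [hsr (8*(3-i)), show (255:Int) = ((255:Nat):Int) from rfl, PySem.Int.band_natCast]
  congr 1
  rw [Nat.shiftRight_eq_div_pow, show (255:Nat) = 2^8 - 1 from rfl, Nat.and_two_pow_sub_one_eq_mod]
  rw [show 8*(3-i) = 24 - 8*i from by omega]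
  simp [Nat.mod_mod_of_dvd]

theorem octet0 (v : Nat) : int_base2 (PySem.List.slice (bitsBE 32 v) none (some 8))
    = PySem.Int.band ((v : Int) >>> (24 : Int)) 255 := by
  have h := octet_eq v 0 (by norm_num)
  norm_num at h
  exact h

theorem octet1 (v : Nat) : int_base2 (PySem.List.slice (bitsBE 32 v) (some 8) (some 16))
    = PySem.Int.band ((v : Int) >>> (16 : Int)) 255 := by
  have h := octet_eq v 1 (by norm_num)
  norm_num at h
  exact h

theorem octet2 (v : Nat) : int_base2 (PySem.List.slice (bitsBE 32 v) (some 16) (some 24))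
    = PySem.Int.band ((v : Int) >>> (8 : Int)) 255 := by
  have h := octet_eq v 2 (by norm_num)
  norm_num at h
  exact h

theorem octet3 (v : Nat) : int_base2 (PySem.List.slice (bitsBE 32 v) (some 24) (some 32))
    = PySem.Int.band ((v : Int) >>> (0 : Int)) 255 := by
  have h := octet_eq v 3 (by norm_num)
  norm_num at h
  exact h

theorem toBin_pad (n : Nat) (hn : n < 2 ^ 32) :
    padd_bits 32 (PySem.List.slice (PySem.Int.toBinChars0b ((n : Nat) : Int)) (some 2) none) = bitsBE 32 n := by
  rw [show PySem.Int.toBinChars0b ((n : Nat) : Int) = '0' :: 'b' :: Nat.toDigits 2 n from by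
    simp [PySem.Int.toBinChars0b]]
  rw [show (2:Int) = ((2:Nat):Int) from rfl, PySem.List.slice_from_natCast]
  simp only [List.drop_succ_cons, List.drop_zero]
  exact pad_toDigits n hn

-- ===== VERDICT (by name: the statement is the Claim_ definition above) =====
theorem find_ip_range_spec : Claim_equal_find_ip_range := by
  intro dst mask hDom hPre
  have hPre' : (0:Int) ≤ mask := hPre
  have hDom' : mask ≤ 2147483648 := by
    unfold Dom_find_ip_range pvDomInt at hDom
    simp only [Bool.and_eq_true, decide_eq_true_eq] at hDom
    exact hDom.2.2
  obtain ⟨hb0, hb1⟩ := band_mask dst mask hPre'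
  have h1 : PySem.Int.band dst mask = (((PySem.Int.band dst mask).toNat : Nat) : Int) := (Int.toNat_of_nonneg hb0).symm
  have hcomp : bit_not mask 32 = 4294967295 - mask := by
    unfold bit_not
    rw [show ((1 <<< 32 : Nat) : Int) = 4294967296 from by rw [Nat.shiftLeft_eq]; norm_num]
    ring
  have hmnlt : (PySem.Int.band dst mask).toNat < 2 ^ 32 := by omega
  have hmx : (((PySem.Int.band dst mask).toNat : Nat) : Int) + (4294967295 - mask)
      = (((PySem.Int.band dst mask + (4294967295 - mask)).toNat : Nat) : Int) := by omega
  have hmxlt : (PySem.Int.band dst mask + (4294967295 - mask)).toNat < 2 ^ 32 := by omega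
  unfold Spec_find_ip_range find_ip_range find_ip_range_alt
  simp only []
  rw [hcomp]
  rw [show PySem.List.pyRange 0 4 1 = [0,1,2,3] from by decide]
  conv_lhs => rw [h1]
  conv_rhs => rw [h1]
  rw [hmx]
  rw [toBin_pad _ hmnlt, toBin_pad _ hmxlt]
  simp only [List.foldl_cons, List.foldl_nil, List.map_cons, List.map_nil]
  norm_num
  simp only [← Int.toNat_eq_max]
  rw [octet0, octet1, octet2, octet3, octet0, octet1, octet2, octet3]
  exact ⟨rfl, rfl⟩
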